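-- pv_equiv track=rewrite | github.com/holgern/taskledger | taskledger/storage/project_identity.py | insert_or_append_project_uuid
-- ===== SOURCE A (Python) =====
-- def insert_or_append_project_uuid(text: str, value: str) -> str:
--     """Insert ``project_uuid = "..."`` into TOML text, preserving comments.
--
--     Placement rules:
--
--     * After the ``taskledger_dir = ...`` line if one exists.
--     * Otherwise appended before the ledger block, or at end of file.
--     * Preserves trailing newline.
--     """
--     lines = text.split("\n") if text else []
--
--     for idx, line in enumerate(lines):
--         stripped = line.strip()
--         if stripped.startswith("taskledger_dir") and _is_toml_key_line(
--             stripped, "taskledger_dir"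
--         ):
--             new_lines = list(lines)
--             new_lines.insert(idx + 1, "")
--             new_lines.insert(
--                 idx + 2,
--                 "# Stable project identity. Commit this with your source tree.",
--             )
--             new_lines.insert(idx + 3, f'project_uuid = "{value}"')
--             return _join_lines(new_lines)
--
--     # No taskledger_dir line – try before the ledger block.
--     for idx, line in enumerate(lines):
--         stripped = line.strip()
--         if stripped.startswith("ledger_ref") and _is_toml_key_line(
--             stripped, "ledger_ref"
--         ):
--             new_lines = list(lines)
--             new_lines.insert(idx, "")
--             new_lines.insert(
--                 idx + 1, "# Stable project identity. Commit with your source tree."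
--             )
--             new_lines.insert(idx + 2, f'project_uuid = "{value}"')
--             return _join_lines(new_lines)
--
--     # Fallback: append at the end.
--     if lines and lines[-1].strip():
--         lines.append("")
--     lines.append("# Stable project identity. Commit this with your source tree.")
--     lines.append(f'project_uuid = "{value}"')
--     return _join_lines(lines)
--
-- def _is_toml_key_line(stripped: str, key: str) -> bool:
--     if not stripped.startswith(key):
--         return False
--     rest = stripped[len(key) :]
--     if not rest:
--         return False
--     rest = rest.lstrip()
--     return rest.startswith("=")
--
-- def _join_lines(lines: list[str]) -> str:
--     result = "\n".join(lines)
--     if result and not result.endswith("\n"):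
--         result += "\n"
--     return result
-- ===== SOURCE B (Python) =====
-- def _matches(stripped, key):
--     return stripped.startswith(key) and stripped[len(key):].lstrip().startswith("=")
--
--
-- def insert_or_append_project_uuid(text: str, value: str) -> str:
--     lines = text.split("\n") if text else []
--     t = l = None
--     # single pass: record the first index of each key line simultaneously
--     for i, line in enumerate(lines):
--         s = line.strip()
--         if t is None and _matches(s, "taskledger_dir"):
--             t = i
--         if l is None and _matches(s, "ledger_ref"):
--             l = i
--     uuid_line = f'project_uuid = "{value}"'
--     if t is not None:
--         pos = t + 1
--         block = ["", "# Stable project identity. Commit this with your source tree.", uuid_line]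
--     elif l is not None:
--         pos = l
--         block = ["", "# Stable project identity. Commit with your source tree.", uuid_line]
--     else:
--         pos = len(lines)
--         pad = [""] if lines and lines[-1].strip() else []
--         block = pad + ["# Stable project identity. Commit this with your source tree.", uuid_line]
--     out = "\n".join(lines[:pos] + block + lines[pos:])
--     return out + "\n" if out and not out.endswith("\n") else out
-- ===== Notes on version B (the rewrite author's own statement) =====
-- stated objective: alternative
-- what changed: Replaces A's two sequential early-return scans (each cloning the list and doing three in-place inserts) by ONE pass over the lines that records the first taskledger_dir and first ledger_ref indices simultaneously in two accumulators, then chooses a single insertion position and block and splices it in once before joining.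
import Mathlib
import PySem

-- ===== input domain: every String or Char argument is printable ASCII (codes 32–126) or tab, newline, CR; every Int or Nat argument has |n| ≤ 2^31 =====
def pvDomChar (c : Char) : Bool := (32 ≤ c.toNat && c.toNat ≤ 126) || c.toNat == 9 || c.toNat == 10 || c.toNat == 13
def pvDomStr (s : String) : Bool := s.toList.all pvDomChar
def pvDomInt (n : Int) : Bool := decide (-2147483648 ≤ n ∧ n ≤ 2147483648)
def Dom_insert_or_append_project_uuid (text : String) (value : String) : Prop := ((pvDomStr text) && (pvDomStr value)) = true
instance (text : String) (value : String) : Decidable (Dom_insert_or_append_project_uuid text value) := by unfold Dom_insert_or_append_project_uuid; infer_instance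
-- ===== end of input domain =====

-- B replaces A's two sequential early-return scans (each with three in-place inserts) by ONE
-- pass recording both first-match indices in two accumulators, then a single splice; objective: alternative.

-- Literal strings and the f-string both Pythons build verbatim.
def cmtThis : String := "# Stable project identity. Commit this with your source tree."
def cmtWith : String := "# Stable project identity. Commit with your source tree."
def projLine (value : String) : String := "project_uuid = \"" ++ value ++ "\""
-- _join_lines of A (B inlines the identical trailing-newline rule, see the B port).
def joinLines (ls : List String) : String :=
  let result := PySem.Str.join "\n" ls
  if PySem.Str.len result != 0 && !PySem.Str.endswith result "\n" then result ++ "\n" else result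

-- ===== PORT A =====
def isTomlKeyLine (stripped key : String) : Bool :=
  if !PySem.Str.startswith stripped key then false
  else
    let rest := PySem.Str.slice stripped (some (PySem.Str.len key : Int)) none
    if PySem.Str.len rest == 0 then false
    else PySem.Str.startswith (PySem.Str.lstrip rest) "="

def loop1A (lines : List String) (value : String) : List (Int × String) → Option String
  | [] => none
  | (idx, line) :: rest =>
    let stripped := PySem.Str.strip line
    if PySem.Str.startswith stripped "taskledger_dir" && isTomlKeyLine stripped "taskledger_dir" then
      let n1 := PySem.List.insert lines (idx + 1) ""
      let n2 := PySem.List.insert n1 (idx + 2) cmtThis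
      let n3 := PySem.List.insert n2 (idx + 3) (projLine value)
      some (joinLines n3)
    else loop1A lines value rest

def loop2A (lines : List String) (value : String) : List (Int × String) → Option String
  | [] => none
  | (idx, line) :: rest =>
    let stripped := PySem.Str.strip line
    if PySem.Str.startswith stripped "ledger_ref" && isTomlKeyLine stripped "ledger_ref" then
      let n1 := PySem.List.insert lines idx ""
      let n2 := PySem.List.insert n1 (idx + 1) cmtWith
      let n3 := PySem.List.insert n2 (idx + 2) (projLine value)
      some (joinLines n3)
    else loop2A lines value rest

-- text.split("\n") = Str.split? (always some, since the separator "\n" is non-empty)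
def insert_or_append_project_uuid (text : String) (value : String) : String :=
  let lines := if PySem.Str.len text != 0 then (PySem.Str.split? text "\n").getD [] else []
  match loop1A lines value (PySem.List.enumerate lines 0) with
  | some r => r
  | none =>
    match loop2A lines value (PySem.List.enumerate lines 0) with
    | some r => r
    | none =>
      let lines2 :=
        if lines.length != 0 &&
            PySem.Str.len (PySem.Str.strip ((PySem.List.pyGet? lines (-1)).getD "")) != 0
        then lines ++ [""] else lines
      joinLines (lines2 ++ [cmtThis, projLine value])

-- ===== PORT B =====
def isKeyB (stripped key : String) : Bool :=
  PySem.Str.startswith stripped key &&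
    PySem.Str.startswith
      (PySem.Str.lstrip (PySem.Str.slice stripped (some (PySem.Str.len key : Int)) none)) "="

-- the single 'for i, line in enumerate(lines)' loop of Source B, carrying (t, l)
def scanB (st : Option Int × Option Int) : List (Int × String) → Option Int × Option Int
  | [] => st
  | (i, line) :: rest =>
    let s := PySem.Str.strip line
    let t := if st.1 == none && isKeyB s "taskledger_dir" then some i else st.1
    let l := if st.2 == none && isKeyB s "ledger_ref" then some i else st.2
    scanB (t, l) rest

def insert_or_append_project_uuid_alt (text : String) (value : String) : String :=
  let lines := if PySem.Str.len text != 0 then (PySem.Str.split? text "\n").getD [] else []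
  let tl := scanB (none, none) (PySem.List.enumerate lines 0)
  let uuidLine := projLine value
  let posBlock : Int × List String :=
    match tl.1 with
    | some t => (t + 1, ["", cmtThis, uuidLine])
    | none =>
      match tl.2 with
      | some l => (l, ["", cmtWith, uuidLine])
      | none =>
        ((lines.length : Int),
          (if lines.length != 0 &&
              PySem.Str.len (PySem.Str.strip ((PySem.List.pyGet? lines (-1)).getD "")) != 0
           then [""] else []) ++ [cmtThis, uuidLine])
  let out := PySem.Str.join "\n"
    (lines.take posBlock.1.toNat ++ posBlock.2 ++ lines.drop posBlock.1.toNat)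
  if PySem.Str.len out != 0 && !PySem.Str.endswith out "\n" then out ++ "\n" else out

-- ===== PRECONDITION & SPEC =====
def Spec_insert_or_append_project_uuid (text : String) (value : String) (out : String) : Prop := out = insert_or_append_project_uuid_alt text value
instance (text : String) (value : String) (out : String) : Decidable (Spec_insert_or_append_project_uuid text value out) := by unfold Spec_insert_or_append_project_uuid; infer_instance

-- ===== CLAIM (what is proved, stated in full; the proofs are below) =====
def Claim_equal_insert_or_append_project_uuid : Prop := ∀ (text : String) (value : String), Dom_insert_or_append_project_uuid text value → Spec_insert_or_append_project_uuid text value (insert_or_append_project_uuid text value)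

-- ===== LEMMAS AND PROOFS =====

theorem startswith_lstrip_empty (s : String) (h : PySem.Str.len s = 0) :
    PySem.Str.startswith (PySem.Str.lstrip s) "=" = false := by
  have hs : s = "" := by
    apply String.toList_inj.mp
    simpa [PySem.Str.len_eq] using h
  subst hs; decide

-- A's guard (startswith && _is_toml_key_line) coincides with B's _matches.
theorem pred_eq (s key : String) :
    (PySem.Str.startswith s key && isTomlKeyLine s key) = isKeyB s key := by
  unfold isTomlKeyLine isKeyB
  cases h : PySem.Str.startswith s key with
  | false => simp
  | true =>
    simp only [Bool.not_true, Bool.false_eq_true, if_false, Bool.true_and]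
    by_cases h0 : PySem.Str.len (PySem.Str.slice s (some (PySem.Str.len key : Int)) none) = 0
    · rw [if_pos (by simpa using h0)]
      exact (startswith_lstrip_empty _ h0).symm
    · rw [if_neg (by simpa using h0)]

theorem insert_at_break {α : Type} (a b : List α) (v : α) :
    PySem.List.insert (a ++ b) ((a.length : Int)) v = a ++ v :: b := by
  rw [PySem.List.insert_natCast _ _ _ (by simp)]
  simp

-- the three chained in-place inserts of A's taskledger_dir branch = one splice after index i
theorem ins3_after (lines : List String) (value : String) (i : Nat) (h : i < lines.length) :
    PySem.List.insert
      (PySem.List.insert (PySem.List.insert lines ((i : Int) + 1) "") ((i : Int) + 2) cmtThis)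
      ((i : Int) + 3) (projLine value)
      = lines.take (i + 1) ++ ["", cmtThis, projLine value] ++ lines.drop (i + 1) := by
  set a := lines.take (i + 1) with ha
  set b := lines.drop (i + 1) with hb
  have hlen : a.length = i + 1 := by simp [ha]; omega
  have hsplit : lines = a ++ b := (List.take_append_drop (i + 1) lines).symm
  have e1 : PySem.List.insert lines ((i : Int) + 1) "" = (a ++ [""]) ++ b := by
    rw [hsplit, show ((i : Int) + 1) = ((a.length : Int)) by rw [hlen]; omega,
      insert_at_break]; simp
  have e2 : PySem.List.insert ((a ++ [""]) ++ b) ((i : Int) + 2) cmtThis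
      = (a ++ ["", cmtThis]) ++ b := by
    rw [show ((i : Int) + 2) = (((a ++ [""]).length : Int)) by simp only [List.length_append, List.length_cons, List.length_nil, hlen]; omega,
      insert_at_break]; simp
  have e3 : PySem.List.insert ((a ++ ["", cmtThis]) ++ b) ((i : Int) + 3) (projLine value)
      = (a ++ ["", cmtThis, projLine value]) ++ b := by
    rw [show ((i : Int) + 3) = (((a ++ ["", cmtThis]).length : Int)) by simp only [List.length_append, List.length_cons, List.length_nil, hlen]; omega,
      insert_at_break]; simp
  rw [e1, e2, e3]

-- the three chained inserts of A's ledger_ref branch = one splice before index i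
theorem ins3_before (lines : List String) (value : String) (i : Nat) (h : i < lines.length) :
    PySem.List.insert
      (PySem.List.insert (PySem.List.insert lines ((i : Int)) "") ((i : Int) + 1) cmtWith)
      ((i : Int) + 2) (projLine value)
      = lines.take i ++ ["", cmtWith, projLine value] ++ lines.drop i := by
  set a := lines.take i with ha
  set b := lines.drop i with hb
  have hlen : a.length = i := by simp [ha]; omega
  have hsplit : lines = a ++ b := (List.take_append_drop i lines).symm
  have e1 : PySem.List.insert lines ((i : Int)) "" = (a ++ [""]) ++ b := by
    rw [hsplit, show ((i : Int)) = ((a.length : Int)) by rw [hlen], insert_at_break]; simp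
  have e2 : PySem.List.insert ((a ++ [""]) ++ b) ((i : Int) + 1) cmtWith
      = (a ++ ["", cmtWith]) ++ b := by
    rw [show ((i : Int) + 1) = (((a ++ [""]).length : Int)) by simp only [List.length_append, List.length_cons, List.length_nil, hlen]; omega,
      insert_at_break]; simp
  have e3 : PySem.List.insert ((a ++ ["", cmtWith]) ++ b) ((i : Int) + 2) (projLine value)
      = (a ++ ["", cmtWith, projLine value]) ++ b := by
    rw [show ((i : Int) + 2) = (((a ++ ["", cmtWith]).length : Int)) by simp only [List.length_append, List.length_cons, List.length_nil, hlen]; omega,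
      insert_at_break]; simp
  rw [e1, e2, e3]

-- A's first loop is a first-match search: it returns on findIdx? of its own guard.
theorem loop1A_eq (lines : List String) (value : String) (l : List String) (s : Nat) :
    loop1A lines value (PySem.List.enumerate l (s : Int)) =
      (l.findIdx? (fun x => PySem.Str.startswith (PySem.Str.strip x) "taskledger_dir" &&
          isTomlKeyLine (PySem.Str.strip x) "taskledger_dir")).map
        (fun j => joinLines
          (PySem.List.insert
            (PySem.List.insert (PySem.List.insert lines (((s + j : Nat) : Int) + 1) "")
              (((s + j : Nat) : Int) + 2) cmtThis)
            (((s + j : Nat) : Int) + 3) (projLine value))) := by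
  induction l generalizing s with
  | nil => simp [PySem.List.enumerate_nil, loop1A]
  | cons x xs ih =>
    rw [PySem.List.enumerate_cons]
    simp only [loop1A, List.findIdx?_cons]
    cases hc : (PySem.Str.startswith (PySem.Str.strip x) "taskledger_dir" &&
        isTomlKeyLine (PySem.Str.strip x) "taskledger_dir") with
    | true => simp
    | false =>
      simp only [Bool.false_eq_true, if_false]
      rw [show ((s : Int) + 1) = (((s + 1 : Nat)) : Int) by push_cast; ring, ih]
      cases h : xs.findIdx? (fun x => PySem.Str.startswith (PySem.Str.strip x) "taskledger_dir" &&
          isTomlKeyLine (PySem.Str.strip x) "taskledger_dir") with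
      | none => simp
      | some j =>
        simp only [Option.map_some]
        rw [show s + 1 + j = s + (j + 1) from by omega]

theorem loop2A_eq (lines : List String) (value : String) (l : List String) (s : Nat) :
    loop2A lines value (PySem.List.enumerate l (s : Int)) =
      (l.findIdx? (fun x => PySem.Str.startswith (PySem.Str.strip x) "ledger_ref" &&
          isTomlKeyLine (PySem.Str.strip x) "ledger_ref")).map
        (fun j => joinLines
          (PySem.List.insert
            (PySem.List.insert (PySem.List.insert lines (((s + j : Nat) : Int)) "")
              (((s + j : Nat) : Int) + 1) cmtWith)
            (((s + j : Nat) : Int) + 2) (projLine value))) := by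
  induction l generalizing s with
  | nil => simp [PySem.List.enumerate_nil, loop2A]
  | cons x xs ih =>
    rw [PySem.List.enumerate_cons]
    simp only [loop2A, List.findIdx?_cons]
    cases hc : (PySem.Str.startswith (PySem.Str.strip x) "ledger_ref" &&
        isTomlKeyLine (PySem.Str.strip x) "ledger_ref") with
    | true => simp
    | false =>
      simp only [Bool.false_eq_true, if_false]
      rw [show ((s : Int) + 1) = (((s + 1 : Nat)) : Int) by push_cast; ring, ih]
      cases h : xs.findIdx? (fun x => PySem.Str.startswith (PySem.Str.strip x) "ledger_ref" &&
          isTomlKeyLine (PySem.Str.strip x) "ledger_ref") with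
      | none => simp
      | some j =>
        simp only [Option.map_some]
        rw [show s + 1 + j = s + (j + 1) from by omega]

-- B's single scan computes the first-match index of each key (kept component stays once set).
theorem scanB_eq (l : List String) (s : Nat) (t0 l0 : Option Int) :
    scanB (t0, l0) (PySem.List.enumerate l (s : Int)) =
      (t0.or ((l.findIdx? (fun x => isKeyB (PySem.Str.strip x) "taskledger_dir")).map
          (fun j => ((s + j : Nat) : Int))),
       l0.or ((l.findIdx? (fun x => isKeyB (PySem.Str.strip x) "ledger_ref")).map
          (fun j => ((s + j : Nat) : Int)))) := by
  induction l generalizing s t0 l0 with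
  | nil => simp [PySem.List.enumerate_nil, scanB]
  | cons x xs ih =>
    rw [PySem.List.enumerate_cons]
    simp only [scanB, List.findIdx?_cons]
    rw [show ((s : Int) + 1) = (((s + 1 : Nat)) : Int) by push_cast; ring, ih]
    congr 1
    · cases t0 with
      | some a => simp
      | none =>
        cases hc : isKeyB (PySem.Str.strip x) "taskledger_dir" with
        | true => simp
        | false =>
          simp only [Bool.false_eq_true, if_false, beq_self_eq_true, Bool.true_and, Option.none_or]
          cases h : xs.findIdx? (fun x => isKeyB (PySem.Str.strip x) "taskledger_dir") with
          | none => simp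
          | some j => simp only [Option.map_some]; rw [show s + 1 + j = s + (j + 1) from by omega]
    · cases l0 with
      | some a => simp
      | none =>
        cases hc : isKeyB (PySem.Str.strip x) "ledger_ref" with
        | true => simp
        | false =>
          simp only [Bool.false_eq_true, if_false, beq_self_eq_true, Bool.true_and, Option.none_or]
          cases h : xs.findIdx? (fun x => isKeyB (PySem.Str.strip x) "ledger_ref") with
          | none => simp
          | some j => simp only [Option.map_some]; rw [show s + 1 + j = s + (j + 1) from by omega]

-- ===== VERDICT (by name: the statement is the Claim_ definition above) =====
theorem insert_or_append_project_uuid_spec : Claim_equal_insert_or_append_project_uuid := by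
  intro text value _
  unfold Spec_insert_or_append_project_uuid
  simp only [insert_or_append_project_uuid, insert_or_append_project_uuid_alt]
  set lines := (if PySem.Str.len text != 0 then (PySem.Str.split? text "\n").getD [] else []) with hlines
  have hfT : (fun x => PySem.Str.startswith (PySem.Str.strip x) "taskledger_dir" &&
      isTomlKeyLine (PySem.Str.strip x) "taskledger_dir")
      = (fun l => isKeyB (PySem.Str.strip l) "taskledger_dir") := funext fun l => pred_eq _ _
  have hfL : (fun x => PySem.Str.startswith (PySem.Str.strip x) "ledger_ref" &&
      isTomlKeyLine (PySem.Str.strip x) "ledger_ref")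
      = (fun l => isKeyB (PySem.Str.strip l) "ledger_ref") := funext fun l => pred_eq _ _
  have h1 := loop1A_eq lines value lines 0
  have h2 := loop2A_eq lines value lines 0
  have hs := scanB_eq lines 0 none none
  rw [hfT] at h1
  rw [hfL] at h2
  simp only [Nat.cast_zero, Nat.zero_add, Option.none_or] at h1 h2 hs
  rw [hs]
  cases ht : lines.findIdx? (fun l => isKeyB (PySem.Str.strip l) "taskledger_dir") with
  | some t =>
    have hlt : t < lines.length := (List.findIdx?_eq_some_iff_findIdx_eq.mp ht).1
    rw [ht] at h1
    simp only [Option.map_some] at h1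
    simp only [h1, Option.map_some]
    rw [ins3_after lines value t hlt]
    have : ((t : Int) + 1).toNat = t + 1 := by omega
    simp [joinLines, this]
  | none =>
    rw [ht] at h1
    simp only [Option.map_none] at h1
    simp only [h1, Option.map_none]
    cases hr : lines.findIdx? (fun l => isKeyB (PySem.Str.strip l) "ledger_ref") with
    | some r =>
      have hlt : r < lines.length := (List.findIdx?_eq_some_iff_findIdx_eq.mp hr).1
      rw [hr] at h2
      simp only [Option.map_some] at h2
      simp only [h2, Option.map_some]
      rw [ins3_before lines value r hlt]
      have : ((r : Int)).toNat = r := by omega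
      simp [joinLines, this]
    | none =>
      rw [hr] at h2
      simp only [Option.map_none] at h2
      simp only [h2, Option.map_none]
      have hsp : (if lines.length != 0 &&
            PySem.Str.len (PySem.Str.strip ((PySem.List.pyGet? lines (-1)).getD "")) != 0
          then lines ++ [""] else lines) ++ [cmtThis, projLine value]
          = lines.take ((lines.length : Int)).toNat ++
            ((if lines.length != 0 &&
                PySem.Str.len (PySem.Str.strip ((PySem.List.pyGet? lines (-1)).getD "")) != 0
              then [""] else []) ++ [cmtThis, projLine value]) ++ lines.drop ((lines.length : Int)).toNat := by
        split_ifs <;> simp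
      simp only [joinLines]
      rw [hsp]
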